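-- pv_equiv track=rewrite | github.com/DumbledoreD/algo-spec | assignments/c4w4/suffix_array_long.py | update_class
-- ===== SOURCE A (Python) =====
-- def update_class(text, length, order_to_start_index, start_index_to_eq_class):
--     new_start_index_to_eq_class = [0] * len(start_index_to_eq_class)
--
--     cur_start_index = order_to_start_index[0]
--     cur_mid_index = (cur_start_index + length) % len(text)
--     cur_eq_class_tuple = (
--         start_index_to_eq_class[cur_start_index],
--         start_index_to_eq_class[cur_mid_index],
--     )
--     cur_eq_class = 0
--
--     new_start_index_to_eq_class[cur_start_index] = cur_eq_class
--
--     for order in range(1, len(order_to_start_index)):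
--         prev_eq_class_tuple, prev_eq_class = cur_eq_class_tuple, cur_eq_class
--
--         cur_start_index = order_to_start_index[order]
--         cur_mid_index = (cur_start_index + length) % len(text)
--         cur_eq_class_tuple = (
--             start_index_to_eq_class[cur_start_index],
--             start_index_to_eq_class[cur_mid_index],
--         )
--
--         cur_eq_class = (
--             prev_eq_class
--             if cur_eq_class_tuple == prev_eq_class_tuple
--             else prev_eq_class + 1
--         )
--
--         new_start_index_to_eq_class[cur_start_index] = cur_eq_class
--
--     return new_start_index_to_eq_class
-- ===== SOURCE B (Python) =====
-- def update_class(text, length, order_to_start_index, start_index_to_eq_class):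
--     n = len(text)
--     sie = start_index_to_eq_class
--     new = [0] * len(sie)
--     cls = 0
--     i = 0
--     m = len(order_to_start_index)
--     while i < m:
--         # start a new run: its first element defines the run key
--         s = order_to_start_index[i]
--         k = (sie[s], sie[(s + length) % n])
--         new[s] = cls
--         i += 1
--         # consume the whole run of equal keys
--         while i < m:
--             t = order_to_start_index[i]
--             if (sie[t], sie[(t + length) % n]) != k:
--                 break
--             new[t] = cls
--             i += 1
--         cls += 1
--     return new
-- ===== Notes on version B (the rewrite author's own statement) =====
-- stated objective: alternative
-- what changed: B is a run-length grouping: an outer loop starts at each run of equal comparison keys and an inner loop writes the run counter into every member of that run, instead of A's single per-element loop that carries the previous key tuple and previous class and decides increment element by element.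
import Mathlib
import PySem

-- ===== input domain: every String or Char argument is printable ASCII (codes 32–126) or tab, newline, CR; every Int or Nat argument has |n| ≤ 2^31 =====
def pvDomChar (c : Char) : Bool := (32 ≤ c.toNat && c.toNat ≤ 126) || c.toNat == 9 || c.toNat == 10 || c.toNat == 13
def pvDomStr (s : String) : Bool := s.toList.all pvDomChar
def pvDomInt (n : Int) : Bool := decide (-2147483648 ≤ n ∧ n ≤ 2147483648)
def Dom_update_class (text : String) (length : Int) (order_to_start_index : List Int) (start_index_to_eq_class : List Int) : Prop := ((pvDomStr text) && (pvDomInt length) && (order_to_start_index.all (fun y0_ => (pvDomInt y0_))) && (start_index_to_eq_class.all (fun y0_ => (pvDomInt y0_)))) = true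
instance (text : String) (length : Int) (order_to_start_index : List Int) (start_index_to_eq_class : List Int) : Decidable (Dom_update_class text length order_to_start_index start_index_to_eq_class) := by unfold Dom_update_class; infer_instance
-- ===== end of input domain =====

-- B replaces A's per-element loop (carrying the previous key tuple and class) by run-length
-- grouping: an outer loop per run of equal keys, an inner loop writing the run counter into
-- the whole run; an alternative decomposition of the same O(n) cost.

-- ===== PORT A =====
def update_class (text : String) (length : Int) (order_to_start_index : List Int) (start_index_to_eq_class : List Int) : List Int :=
  let n : Int := PySem.Str.len text
  let new0 : List Int := List.replicate start_index_to_eq_class.length 0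
  match PySem.List.pyGet? order_to_start_index 0 with
  | none => []  -- Python raises IndexError here (order_to_start_index[0]); excluded by Pre_
  | some cur0 =>
    let t0 : Int × Int :=
      (PySem.List.pyGetD start_index_to_eq_class cur0 0,
       PySem.List.pyGetD start_index_to_eq_class (PySem.Int.mod (cur0 + length) n) 0)
    let st := (PySem.List.pyRange 1 (order_to_start_index.length : Int) 1).foldl
      (fun (st : (Int × Int) × Int × List Int) order =>
        let s := PySem.List.pyGetD order_to_start_index order 0
        let ct : Int × Int :=
          (PySem.List.pyGetD start_index_to_eq_class s 0,
           PySem.List.pyGetD start_index_to_eq_class (PySem.Int.mod (s + length) n) 0)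
        let cc := if ct = st.1 then st.2.1 else st.2.1 + 1
        (ct, cc, PySem.List.pySetD st.2.2 s cc))
      (t0, 0, PySem.List.pySetD new0 cur0 0)
    st.2.2

-- ===== PORT B =====
-- the comparison key of a start index (B computes it inline; named for the port)
def altKey (length n : Int) (sie : List Int) (s : Int) : Int × Int :=
  (PySem.List.pyGetD sie s 0, PySem.List.pyGetD sie (PySem.Int.mod (s + length) n) 0)

-- B's inner while: consume the run of elements whose key equals k, writing cls;
-- returns (updated array, unconsumed rest)
def altRun (length n : Int) (sie : List Int) (k : Int × Int) (cls : Int) :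
    List Int → List Int → List Int × List Int
  | new, [] => (new, [])
  | new, s :: ss =>
    if altKey length n sie s = k then
      altRun length n sie k cls (PySem.List.pySetD new s cls) ss
    else (new, s :: ss)

theorem altRun_len_le (length n : Int) (sie : List Int) (k : Int × Int) (cls : Int) :
    ∀ (new rest : List Int), (altRun length n sie k cls new rest).2.length ≤ rest.length := by
  intro new rest
  induction rest generalizing new with
  | nil => simp [altRun]
  | cons s ss ih =>
    simp only [altRun]
    split
    · exact le_trans (ih _) (Nat.le_succ _)
    · simp

-- B's outer while: start a run at the head, write it, let the inner loop finish the run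
def altOuter (length n : Int) (sie : List Int) : List Int → Int → List Int → List Int
  | new, _, [] => new
  | new, cls, s :: ss =>
    let k := altKey length n sie s
    let p := altRun length n sie k cls (PySem.List.pySetD new s cls) ss
    altOuter length n sie p.1 (cls + 1) p.2
  termination_by _ _ rest => rest.length
  decreasing_by exact Nat.lt_succ_of_le (altRun_len_le _ _ _ _ _ _ _)

def update_class_alt (text : String) (length : Int) (order_to_start_index : List Int) (start_index_to_eq_class : List Int) : List Int :=
  altOuter length (PySem.Str.len text) start_index_to_eq_class
    (List.replicate start_index_to_eq_class.length 0) 0 order_to_start_index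

-- ===== PRECONDITION & SPEC =====
-- Pre_ excludes exactly the inputs where Python A raises: empty order_to_start_index
-- (IndexError), empty text (ZeroDivisionError in %), and out-of-range indexing of
-- start_index_to_eq_class (IndexError).
def Pre_update_class (text : String) (length : Int) (order_to_start_index : List Int) (start_index_to_eq_class : List Int) : Prop :=
  order_to_start_index ≠ [] ∧ text ≠ "" ∧
  ∀ s ∈ order_to_start_index,
    PySem.Raise.InRange start_index_to_eq_class.length s ∧
    PySem.Raise.InRange start_index_to_eq_class.length (PySem.Int.mod (s + length) (PySem.Str.len text))
instance (text : String) (length : Int) (order_to_start_index : List Int) (start_index_to_eq_class : List Int) : Decidable (Pre_update_class text length order_to_start_index start_index_to_eq_class) := by unfold Pre_update_class; infer_instance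

def pvWitness_update_class : String × Int × List Int × List Int := ("ab", 1, [0, 1], [0, 1])

def Spec_update_class (text : String) (length : Int) (order_to_start_index : List Int) (start_index_to_eq_class : List Int) (out : List Int) : Prop := out = update_class_alt text length order_to_start_index start_index_to_eq_class
instance (text : String) (length : Int) (order_to_start_index : List Int) (start_index_to_eq_class : List Int) (out : List Int) : Decidable (Spec_update_class text length order_to_start_index start_index_to_eq_class out) := by unfold Spec_update_class; infer_instance

-- ===== CLAIM (what is proved, stated in full; the proofs are below) =====
def Claim_equal_update_class : Prop := ∀ (text : String) (length : Int) (order_to_start_index : List Int) (start_index_to_eq_class : List Int), Dom_update_class text length order_to_start_index start_index_to_eq_class → Pre_update_class text length order_to_start_index start_index_to_eq_class → Spec_update_class text length order_to_start_index start_index_to_eq_class (update_class text length order_to_start_index start_index_to_eq_class)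

-- ===== LEMMAS AND PROOFS =====

-- A's loop body
def pvStep (length n : Int) (sie : List Int) (st : (Int × Int) × Int × List Int) (s : Int) :
    (Int × Int) × Int × List Int :=
  let ct := altKey length n sie s
  let cc := if ct = st.1 then st.2.1 else st.2.1 + 1
  (ct, cc, PySem.List.pySetD st.2.2 s cc)

-- class labels A assigns to the suffixes rest (in order-order), given previous key/class
def pvLabs (length n : Int) (sie : List Int) : Int × Int → Int → List Int → List Int
  | _, _, [] => []
  | pt, pc, s :: ss =>
    let ct := altKey length n sie s
    let cc := if ct = pt then pc else pc + 1
    cc :: pvLabs length n sie ct cc ss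

theorem pvA_fold (length n : Int) (sie : List Int) (rest : List Int) :
    ∀ (pt : Int × Int) (pc : Int) (arr : List Int),
    (rest.foldl (pvStep length n sie) (pt, pc, arr)).2.2
    = (rest.zip (pvLabs length n sie pt pc rest)).foldl
        (fun a sc => PySem.List.pySetD a sc.1 sc.2) arr := by
  induction rest with
  | nil => intro pt pc arr; rfl
  | cons s ss ih =>
    intro pt pc arr
    simp only [List.foldl_cons, pvLabs, pvStep, List.zip_cons_cons]
    exact ih _ _ _

-- B's run grouping computes the same scatter of A's labels
theorem pvB_runs (length n : Int) (sie : List Int) (rest : List Int) :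
    ∀ (k : Int × Int) (cls : Int) (new : List Int),
    altOuter length n sie (altRun length n sie k cls new rest).1 (cls + 1)
        (altRun length n sie k cls new rest).2
    = (rest.zip (pvLabs length n sie k cls rest)).foldl
        (fun a sc => PySem.List.pySetD a sc.1 sc.2) new := by
  induction rest with
  | nil => intro k cls new; simp [altRun, pvLabs, altOuter]
  | cons s ss ih =>
    intro k cls new
    by_cases h : altKey length n sie s = k
    · simp only [altRun, pvLabs, h, List.zip_cons_cons, List.foldl_cons]
      exact ih k cls (PySem.List.pySetD new s cls)
    · simp only [altRun, pvLabs, if_neg h, List.zip_cons_cons, List.foldl_cons]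
      rw [altOuter]
      exact ih (altKey length n sie s) (cls + 1) (PySem.List.pySetD new s (cls + 1))

-- ===== VERDICT (by name: the statements are the Claim_ definitions above) =====
theorem update_class_spec : Claim_equal_update_class := by
  intro text length ots sie _ hpre
  obtain ⟨hne, -, -⟩ := hpre
  obtain ⟨s0, rest, rfl⟩ := List.exists_cons_of_ne_nil hne
  show update_class _ _ _ _ = update_class_alt _ _ _ _
  unfold update_class update_class_alt
  simp only [PySem.List.pyGet?_zero_cons]
  show (List.foldl
          (fun st order => pvStep length (PySem.Str.len text) sie st (PySem.List.pyGetD (s0 :: rest) order 0))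
          (altKey length (PySem.Str.len text) sie s0, 0,
            PySem.List.pySetD (List.replicate sie.length 0) s0 0)
          (PySem.List.pyRange 1 ((s0 :: rest).length : Int))).2.2
      = altOuter length (PySem.Str.len text) sie (List.replicate sie.length 0) 0 (s0 :: rest)
  rw [PySem.List.foldl_pyRange_pyGetD' (s0 :: rest) 0 (pvStep length (PySem.Str.len text) sie)
        (altKey length (PySem.Str.len text) sie s0, 0,
          PySem.List.pySetD (List.replicate sie.length 0) s0 0)
        (show (0:Int) ≤ 1 by omega)]
  simp only [Int.toNat_one, List.drop_succ_cons, List.drop_zero]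
  rw [pvA_fold length (PySem.Str.len text) sie rest (altKey length (PySem.Str.len text) sie s0) 0
        (PySem.List.pySetD (List.replicate sie.length 0) s0 0),
      altOuter]
  exact (pvB_runs length (PySem.Str.len text) sie rest
    (altKey length (PySem.Str.len text) sie s0) 0
    (PySem.List.pySetD (List.replicate sie.length 0) s0 0)).symm
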